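-- pv_equiv track=rewrite | github.com/santinoacco/LaCadenita_Stat.Mec | carlitox_apu.py | Medir_Energia
-- ===== SOURCE A (Python) =====
-- def Medir_Energia(Estados):
--     E = 0
--     for j in Estados:
--         if j == 1:
--             E += 1
--         else:
--             E -= 1
--     return E
-- ===== SOURCE B (Python) =====
-- def Medir_Energia(Estados):
--     lst = list(Estados)
--     return 2 * lst.count(1) - len(lst)
-- ===== Notes on version B (the rewrite author's own statement) =====
-- stated objective: simpler
-- what changed: Replaces the branchy +1/-1 accumulation loop with the closed form 2*count(1) - len: one counting pass plus arithmetic.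
import Mathlib
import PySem

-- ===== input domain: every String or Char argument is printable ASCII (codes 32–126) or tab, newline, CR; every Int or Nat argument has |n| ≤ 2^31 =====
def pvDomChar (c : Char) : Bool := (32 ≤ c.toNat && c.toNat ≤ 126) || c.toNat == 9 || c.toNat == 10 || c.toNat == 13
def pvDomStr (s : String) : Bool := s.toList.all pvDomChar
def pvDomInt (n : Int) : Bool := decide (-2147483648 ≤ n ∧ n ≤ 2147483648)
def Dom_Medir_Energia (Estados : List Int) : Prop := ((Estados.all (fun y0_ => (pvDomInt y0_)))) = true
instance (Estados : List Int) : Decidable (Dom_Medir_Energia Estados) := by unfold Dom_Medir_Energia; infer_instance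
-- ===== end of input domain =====

-- B replaces A's branchy +1/-1 accumulation loop with the closed form 2*count(1) - len (objective: simpler).


-- ===== PORT A =====
def Medir_Energia (Estados : List Int) : Int :=
  Estados.foldl (fun E j => if j == 1 then E + 1 else E - 1) 0

-- ===== PORT B =====
def Medir_Energia_alt (Estados : List Int) : Int :=
  2 * (PySem.List.count Estados 1) - Estados.length

-- ===== PRECONDITION & SPEC =====
def Spec_Medir_Energia (Estados : List Int) (out : Int) : Prop := out = Medir_Energia_alt Estados
instance (Estados : List Int) (out : Int) : Decidable (Spec_Medir_Energia Estados out) := by unfold Spec_Medir_Energia; infer_instance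

-- ===== CLAIM (what is proved, stated in full; the proofs are below) =====
def Claim_equal_Medir_Energia : Prop := ∀ (Estados : List Int), Dom_Medir_Energia Estados → Spec_Medir_Energia Estados (Medir_Energia Estados)

-- ===== LEMMAS AND PROOFS =====

-- ===== VERDICT (by name: the statement is the Claim_ definition above) =====
theorem fold_energy (Estados : List Int) (E : Int) :
    Estados.foldl (fun E j => if j == 1 then E + 1 else E - 1) E
      = E + 2 * (PySem.List.count Estados 1) - Estados.length := by
  induction Estados generalizing E with
  | nil => simp [PySem.List.count]
  | cons x xs ih =>
    simp only [List.foldl]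
    rw [ih]
    by_cases h : x = 1 <;>
      simp [PySem.List.count, h] <;> ring

theorem Medir_Energia_spec : Claim_equal_Medir_Energia := by
  intro Estados _
  unfold Spec_Medir_Energia Medir_Energia Medir_Energia_alt
  rw [fold_energy]; ring
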